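-- pv_equiv track=rewrite | github.com/Zhang-Setsail/ECE_HW2 | tee.py | bufferbased
-- ===== SOURCE A (Python) =====
-- def match(value, list_of_list):
--     for e in list_of_list:
--         if value == e[1]:
--             return e
--
-- def prevmatch(value, list_of_list):
--     for e in list_of_list:
--         if value == e[1]:
--             return e
--     value = max(i[1] for i in list_of_list)
--     for e in list_of_list:
--         if value == e[1]:
--             return e
--
-- def bufferbased(rate_prev, buf_now, r, R_i , cu = 126):
--     '''
--     Input:
--     rate_prev: The previously used video rate
--     Buf_now: The current buffer occupancy
--     r: The size of reservoir  //At least greater than Chunk Time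
--     cu: The size of cushion //between 90 to 216, paper used 126
--     R_i: Array of bitrates of videos, key will be bitrate, and value will be the byte size of the chunk
--
--     Output:
--     Rate_next: The next video rate
--     '''
--
--     R_max = max(i[1] for i in R_i)
--     R_min = min(i[1] for i in R_i)
--     rate_prev = prevmatch(rate_prev,R_i)
--
--     #set rate_plus to lowest reasonable rate
--     if rate_prev[1] == R_max:
--         rate_plus = R_max
--     else:
--         more_rate_prev = list(i[1] for i in R_i if i[1] > rate_prev[1])
--         if more_rate_prev == []:
--             rate_plus = rate_prev[1]
--         else:
--             rate_plus = min(more_rate_prev)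
--
--     #set rate_min to highest reasonable rate
--     if rate_prev[1] == R_min:
--         rate_mins = R_min
--     else:
--         less_rate_prev= list(i[1] for i in R_i if i[1] < rate_prev[1])
--         if less_rate_prev == []:
--             rate_mins = rate_prev[1]
--         else:
--             rate_mins = max(less_rate_prev)
--
--     #Buffer based Algorithm
--     if buf_now['time'] <= r: #1st check if buffer time is too small, set to R_min
--         rate_next = R_min
--         rate_next = match(R_min, R_i)[0]
--     elif buf_now['time'] >= (r + cu):  #too big, set R_max
--         rate_next = R_max
--         rate_next = match(R_max, R_i)[0]
--     elif buf_now['current'] >= rate_plus: #check if big enough get a different reasonable rate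
--         less_buff_now= list(i[1] for i in R_i if i[1] < buf_now['current'])
--         if less_buff_now == []:
--             rate_next = rate_prev[0]
--         else:
--             rate_next = max(less_buff_now)
--             rate_next = match(rate_next, R_i)[0]
--     elif buf_now['current'] <= rate_mins: #check if small enough for a different reasonable rate
--         more_buff_now= list(i[1] for i in R_i if i[1] > buf_now['current'])
--         if more_buff_now == []:
--             rate_next = rate_prev[0]
--         else:
--             rate_next = min(more_buff_now)
--             rate_next = match(rate_next, R_i)[0]
--     else:
--         rate_next = rate_prev[0] #else give up and try again next time
--
--     return rate_next
-- ===== SOURCE B (Python) =====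
-- def bufferbased(rate_prev, buf_now, r, R_i, cu=126):
--     # Build once: first-occurrence index byte-size -> element, plus the sorted
--     # distinct byte-sizes; all branch decisions then walk the sorted list.
--     first = {}
--     for e in R_i:
--         if e[1] not in first:
--             first[e[1]] = e
--     sizes = sorted(first)
--     R_min = sizes[0]
--     R_max = sizes[-1]
--     prev = first.get(rate_prev)
--     if prev is None:
--         prev = first[R_max]
--
--     def above(x):  # smallest distinct size strictly greater than x
--         for v in sizes:
--             if v > x:
--                 return v
--         return None
--
--     def below(x):  # largest distinct size strictly smaller than x
--         lo = None
--         for v in sizes: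
--             if v >= x:
--                 break
--             lo = v
--         return lo
--
--     rate_plus = above(prev[1])
--     if rate_plus is None:
--         rate_plus = prev[1]
--     rate_mins = below(prev[1])
--     if rate_mins is None:
--         rate_mins = prev[1]
--
--     t = buf_now['time']
--     if t <= r:
--         return first[R_min][0]
--     if t >= r + cu:
--         return first[R_max][0]
--     c = buf_now['current']
--     if c >= rate_plus:
--         v = below(c)
--         return prev[0] if v is None else first[v][0]
--     if c <= rate_mins:
--         v = above(c)
--         return prev[0] if v is None else first[v][0]
--     return prev[0]
-- ===== Notes on version B (the rewrite author's own statement) =====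
-- stated objective: alternative
-- what changed: B builds a first-occurrence byte-size->element dict once and one sorted distinct-size list, answering every branch by walking the sorted list for neighbours, instead of A's per-branch filter+min/max scans and repeated linear match/prevmatch rescans of R_i.
-- outside the precondition, e.g. on bufferbased(500, {'time': 5}, 10, [], 126): A raises ValueError, B raises IndexError; on bufferbased(500, {}, 10, [(500, 2)], 126): A raises KeyError, B raises KeyError; on bufferbased(500, {'time': 50}, 10, [(500, 2), (1000, 5)], 126): A raises KeyError, B raises KeyError
import Mathlib
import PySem

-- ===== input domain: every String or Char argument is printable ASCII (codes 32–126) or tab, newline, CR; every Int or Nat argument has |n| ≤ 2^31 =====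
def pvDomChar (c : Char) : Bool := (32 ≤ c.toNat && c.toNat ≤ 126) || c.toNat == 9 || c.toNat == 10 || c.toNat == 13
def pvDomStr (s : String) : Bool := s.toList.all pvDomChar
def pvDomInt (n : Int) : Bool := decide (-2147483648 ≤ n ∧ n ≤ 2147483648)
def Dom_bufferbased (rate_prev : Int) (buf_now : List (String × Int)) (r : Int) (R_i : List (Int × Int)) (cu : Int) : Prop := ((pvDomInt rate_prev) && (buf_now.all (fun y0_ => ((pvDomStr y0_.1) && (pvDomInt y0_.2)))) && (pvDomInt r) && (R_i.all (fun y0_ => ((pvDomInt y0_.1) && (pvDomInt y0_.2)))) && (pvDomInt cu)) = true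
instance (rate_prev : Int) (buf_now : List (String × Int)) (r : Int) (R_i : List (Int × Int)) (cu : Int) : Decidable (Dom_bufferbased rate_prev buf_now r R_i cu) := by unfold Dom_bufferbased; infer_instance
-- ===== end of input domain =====

-- B replaces A's per-branch filter+min/max scans and linear `match` rescans by a first-occurrence
-- size→element dict built once plus one sorted distinct-size list that every branch walks (objective: alternative).

-- ===== PORT A =====
-- match(value, list_of_list): first element e with e[1] == value (none = no match, Python returns None)
def pyMatch? (value : Int) : List (Int × Int) → Option (Int × Int)
  | [] => none
  | e :: t => if value == e.2 then some e else pyMatch? value t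

-- prevmatch(value, list_of_list); none only when the list is empty (Python raises ValueError there)
def pyPrevmatch? (value : Int) (l : List (Int × Int)) : Option (Int × Int) :=
  match pyMatch? value l with
  | some e => some e
  | none =>
    match PySem.List.max? (l.map (fun i => i.2)) (fun x => x) with
    | none => none
    | some v => pyMatch? v l

def bufferbased (rate_prev : Int) (buf_now : List (String × Int)) (r : Int) (R_i : List (Int × Int)) (cu : Int) : Int :=
  match PySem.List.max? (R_i.map (fun i => i.2)) (fun x => x),
        PySem.List.min? (R_i.map (fun i => i.2)) (fun x => x),
        pyPrevmatch? rate_prev R_i with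
  | some Rmax, some Rmin, some prev =>
    let rate_plus : Int :=
      if prev.2 == Rmax then Rmax
      else
        let more := (R_i.filter (fun i => decide (prev.2 < i.2))).map (fun i => i.2)
        if more = [] then prev.2 else (PySem.List.min? more (fun x => x)).getD 0
    let rate_mins : Int :=
      if prev.2 == Rmin then Rmin
      else
        let less := (R_i.filter (fun i => decide (i.2 < prev.2))).map (fun i => i.2)
        if less = [] then prev.2 else (PySem.List.max? less (fun x => x)).getD 0
    if (PySem.Dict.mk buf_now).getD "time" 0 ≤ r then
      ((pyMatch? Rmin R_i).getD (0, 0)).1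
    else if r + cu ≤ (PySem.Dict.mk buf_now).getD "time" 0 then
      ((pyMatch? Rmax R_i).getD (0, 0)).1
    else if rate_plus ≤ (PySem.Dict.mk buf_now).getD "current" 0 then
      let less := (R_i.filter (fun i => decide (i.2 < (PySem.Dict.mk buf_now).getD "current" 0))).map (fun i => i.2)
      if less = [] then prev.1
      else ((pyMatch? ((PySem.List.max? less (fun x => x)).getD 0) R_i).getD (0, 0)).1
    else if (PySem.Dict.mk buf_now).getD "current" 0 ≤ rate_mins then
      let more := (R_i.filter (fun i => decide ((PySem.Dict.mk buf_now).getD "current" 0 < i.2))).map (fun i => i.2)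
      if more = [] then prev.1
      else ((pyMatch? ((PySem.List.min? more (fun x => x)).getD 0) R_i).getD (0, 0)).1
    else prev.1
  | _, _, _ => 0  -- unreachable inside Pre_ (R_i ≠ []); Python raises ValueError

-- ===== PORT B =====
-- first = {}; for e in R_i: if e[1] not in first: first[e[1]] = e
def pvFirstIdx (l : List (Int × Int)) : PySem.Dict Int (Int × Int) :=
  l.foldl (fun d e => if d.contains e.2 then d else d.insert e.2 e) PySem.Dict.empty

-- def above(x): first v in sizes with v > x
def pvAbove (x : Int) : List Int → Option Int
  | [] => none
  | v :: t => if x < v then some v else pvAbove x t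

-- def below(x): lo = None; for v in sizes: if v >= x: break; lo = v
def pvBelow (x : Int) : List Int → Option Int → Option Int
  | [], acc => acc
  | v :: t, acc => if x ≤ v then acc else pvBelow x t (some v)

-- return prev[0] if v is None else first[v][0]
def pvLookup (first : PySem.Dict Int (Int × Int)) (dflt : Int) (o : Option Int) : Int :=
  o.elim dflt (fun v => ((first.get? v).getD (0, 0)).1)

def bufferbased_alt (rate_prev : Int) (buf_now : List (String × Int)) (r : Int) (R_i : List (Int × Int)) (cu : Int) : Int :=
  let first := pvFirstIdx R_i
  let sizes := PySem.List.sorted first.keys (fun x => x)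
  (PySem.List.pyGet? sizes 0).elim 0 fun Rmin =>    -- sizes[0]; none = IndexError, unreachable inside Pre_
  (PySem.List.pyGet? sizes (-1)).elim 0 fun Rmax =>  -- sizes[-1]
    let prev := (first.get? rate_prev).getD ((first.get? Rmax).getD (0, 0))
    let rate_plus := (pvAbove prev.2 sizes).getD prev.2
    let rate_mins := (pvBelow prev.2 sizes none).getD prev.2
    let t := (PySem.Dict.mk buf_now).getD "time" 0
    if t ≤ r then ((first.get? Rmin).getD (0, 0)).1
    else if r + cu ≤ t then ((first.get? Rmax).getD (0, 0)).1
    else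
      let c := (PySem.Dict.mk buf_now).getD "current" 0
      if rate_plus ≤ c then
        pvLookup first prev.1 (pvBelow c sizes none)
      else if c ≤ rate_mins then
        pvLookup first prev.1 (pvAbove c sizes)
      else prev.1

-- ===== PRECONDITION & SPEC =====
-- Pre_ excludes exactly the inputs where the Python A raises: empty R_i (ValueError in max),
-- a missing 'time' key (KeyError), or a missing 'current' key when the middle branches need it (KeyError).
def Pre_bufferbased (rate_prev : Int) (buf_now : List (String × Int)) (r : Int) (R_i : List (Int × Int)) (cu : Int) : Prop :=
  R_i ≠ [] ∧ (PySem.Dict.mk buf_now).contains "time" = true ∧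
    ((PySem.Dict.mk buf_now).contains "current" = true ∨
      (PySem.Dict.mk buf_now).getD "time" 0 ≤ r ∨
      r + cu ≤ (PySem.Dict.mk buf_now).getD "time" 0)
instance (rate_prev : Int) (buf_now : List (String × Int)) (r : Int) (R_i : List (Int × Int)) (cu : Int) : Decidable (Pre_bufferbased rate_prev buf_now r R_i cu) := by unfold Pre_bufferbased; infer_instance

def pvWitness_bufferbased : Int × (List (String × Int)) × Int × (List (Int × Int)) × Int :=
  (500, [("time", 50), ("current", 3)], 10, [(500, 2), (1000, 5)], 126)

def Spec_bufferbased (rate_prev : Int) (buf_now : List (String × Int)) (r : Int) (R_i : List (Int × Int)) (cu : Int) (out : Int) : Prop := out = bufferbased_alt rate_prev buf_now r R_i cu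
instance (rate_prev : Int) (buf_now : List (String × Int)) (r : Int) (R_i : List (Int × Int)) (cu : Int) (out : Int) : Decidable (Spec_bufferbased rate_prev buf_now r R_i cu out) := by unfold Spec_bufferbased; infer_instance

-- ===== CLAIM (what is proved, stated in full; the proofs are below) =====
def Claim_equal_bufferbased : Prop := ∀ (rate_prev : Int) (buf_now : List (String × Int)) (r : Int) (R_i : List (Int × Int)) (cu : Int), Dom_bufferbased rate_prev buf_now r R_i cu → Pre_bufferbased rate_prev buf_now r R_i cu → Spec_bufferbased rate_prev buf_now r R_i cu (bufferbased rate_prev buf_now r R_i cu)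

-- ===== LEMMAS AND PROOFS =====

theorem pyMatch?_mem {v : Int} {l : List (Int × Int)} {e : Int × Int}
    (h : pyMatch? v l = some e) : e ∈ l ∧ e.2 = v := by
  induction l with
  | nil => simp [pyMatch?] at h
  | cons a t ih =>
    simp only [pyMatch?] at h
    split at h
    · rename_i hv; cases h; exact ⟨List.mem_cons_self, by simpa using (beq_iff_eq.mp hv).symm⟩
    · rcases ih h with ⟨h1, h2⟩; exact ⟨List.mem_cons_of_mem _ h1, h2⟩

theorem pyMatch?_eq_none_iff {v : Int} {l : List (Int × Int)} :
    pyMatch? v l = none ↔ v ∉ l.map (fun i => i.2) := by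
  induction l with
  | nil => simp [pyMatch?]
  | cons a t ih =>
    simp only [pyMatch?, List.map_cons, List.mem_cons]
    by_cases hv : v = a.2
    · simp [hv]
    · simp [hv, ih]

theorem get?_pvFirstIdx_aux (v : Int) (l : List (Int × Int)) :
    ∀ d : PySem.Dict Int (Int × Int),
      (l.foldl (fun d e => if d.contains e.2 then d else d.insert e.2 e) d).get? v =
        match d.get? v with
        | some e => some e
        | none => pyMatch? v l := by
  induction l with
  | nil => intro d; cases h : d.get? v <;> simp [h, pyMatch?]
  | cons a t ih =>
    intro d
    simp only [List.foldl_cons]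
    by_cases hc : d.contains a.2 = true
    · rw [if_pos hc, ih]
      cases h : d.get? v with
      | some e => simp only []
      | none =>
        simp only []
        have hv : v ≠ a.2 := by
          intro hv
          rw [PySem.Dict.contains_eq_isSome_get?, ← hv, h] at hc
          simp at hc
        simp [pyMatch?, hv]
    -- d does not contain a.2: the loop inserts a
    · rw [if_neg hc, ih]
      by_cases hv : v = a.2
      · rw [PySem.Dict.contains_eq_isSome_get?] at hc
        have h : d.get? v = none := by
          rw [hv]; cases hh : d.get? a.2
          · rfl
          · rw [hh] at hc; simp at hc
        simp only [h, PySem.Dict.get?_insert, if_pos hv]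
        simp [pyMatch?, hv]
      · simp only [PySem.Dict.get?_insert, if_neg hv]
        cases h : d.get? v with
        | some e => simp only []
        | none => simp [pyMatch?, hv]

theorem get?_pvFirstIdx (v : Int) (l : List (Int × Int)) :
    (pvFirstIdx l).get? v = pyMatch? v l := by
  rw [pvFirstIdx, get?_pvFirstIdx_aux]
  simp [PySem.Dict.get?_empty]

theorem nodup_keys_pvFirstIdx (l : List (Int × Int)) : (pvFirstIdx l).keys.Nodup := by
  rw [pvFirstIdx]
  have : ∀ d : PySem.Dict Int (Int × Int), d.keys.Nodup →
      (l.foldl (fun d e => if d.contains e.2 then d else d.insert e.2 e) d).keys.Nodup := by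
    induction l with
    | nil => intro d h; simpa using h
    | cons a t ih =>
      intro d h
      simp only [List.foldl_cons]
      split
      · exact ih d h
      · exact ih _ (PySem.Dict.nodup_keys_insert d a.2 a h)
  exact this _ PySem.Dict.nodup_keys_empty

theorem mem_keys_pvFirstIdx (v : Int) (l : List (Int × Int)) :
    v ∈ (pvFirstIdx l).keys ↔ v ∈ l.map (fun i => i.2) := by
  rw [← PySem.Dict.contains_iff_mem_keys, PySem.Dict.contains_eq_isSome_get?, get?_pvFirstIdx]
  cases h : pyMatch? v l with
  | none => simp [pyMatch?_eq_none_iff.mp h]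
  | some e =>
    simp only [Option.isSome_some, true_iff]
    rcases pyMatch?_mem h with ⟨h1, h2⟩
    exact h2 ▸ List.mem_map_of_mem h1

theorem sorted_keys_lt (l : List (Int × Int)) :
    (PySem.List.sorted (pvFirstIdx l).keys (fun x => x)).Pairwise (· < ·) := by
  have hle := PySem.List.sorted_pairwise (pvFirstIdx l).keys (fun x => x)
  have hnd : (PySem.List.sorted (pvFirstIdx l).keys (fun x => x)).Nodup :=
    (PySem.List.sorted_perm (pvFirstIdx l).keys (fun x => x) false).nodup_iff.mpr
      (nodup_keys_pvFirstIdx l)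
  exact (hle.and hnd).imp (fun {a b} h => lt_of_le_of_ne h.1 h.2)

-- last element of a strictly sorted list is the maximum; conversely head is the minimum
theorem getLast?_isMax {s : List Int} (hs : s.Pairwise (· < ·)) {m : Int}
    (h : s.getLast? = some m) : m ∈ s ∧ ∀ y ∈ s, y ≤ m := by
  induction s with
  | nil => simp at h
  | cons a t ih =>
    cases t with
    | nil =>
      simp at h; subst h; simp
    | cons b u =>
      rw [List.getLast?_cons_cons] at h
      rcases ih (hs.tail) h with ⟨h1, h2⟩
      refine ⟨List.mem_cons_of_mem _ h1, ?_⟩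
      intro y hy
      rcases List.mem_cons.mp hy with rfl | hy
      · exact le_of_lt (List.rel_of_pairwise_cons hs h1)
      · exact h2 y hy

theorem head?_isMin {s : List Int} (hs : s.Pairwise (· < ·)) {m : Int}
    (h : s.head? = some m) : m ∈ s ∧ ∀ y ∈ s, m ≤ y := by
  cases s with
  | nil => simp at h
  | cons a t =>
    simp only [List.head?_cons, Option.some.injEq] at h; subst h
    exact ⟨List.mem_cons_self, by
      intro y hy
      rcases List.mem_cons.mp hy with rfl | hy
      · exact le_refl _
      · exact le_of_lt (List.rel_of_pairwise_cons hs hy)⟩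

theorem pvAbove_eq_head_filter (x : Int) (s : List Int) :
    pvAbove x s = (s.filter (fun v => decide (x < v))).head? := by
  induction s with
  | nil => rfl
  | cons a t ih =>
    simp only [pvAbove, List.filter_cons]
    by_cases h : x < a
    · simp [h]
    · simp [h, ih]

theorem pvBelow_eq_filter (x : Int) {s : List Int} (hs : s.Pairwise (· < ·)) :
    ∀ acc, pvBelow x s acc = ((s.filter (fun v => decide (v < x))).getLast?).or acc := by
  induction s with
  | nil => intro acc; rfl
  | cons a t ih =>
    intro acc
    simp only [pvBelow, List.filter_cons]
    by_cases h : x ≤ a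
    · rw [if_pos h]
      have hemp : t.filter (fun v => decide (v < x)) = [] := by
        rw [List.filter_eq_nil_iff]
        intro b hb
        have := List.rel_of_pairwise_cons hs hb
        simp; omega
      simp [hemp, not_lt.mpr h]
    · rw [if_neg h, ih hs.tail]
      rw [not_le] at h
      simp only [h, decide_true, if_true]
      rw [List.getLast?_cons]
      cases hlt : (t.filter (fun v => decide (v < x))).getLast? with
      | none => simp
      | some b =>
        have : t.filter (fun v => decide (v < x)) ≠ [] := by
          intro hc; rw [hc] at hlt; simp at hlt
        simp

theorem pyGet?_zero_head {l : List Int} (h : l ≠ []) : PySem.List.pyGet? l 0 = l.head? := by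
  cases l with
  | nil => simp at h
  | cons a t => simp [PySem.List.pyGet?, PySem.List.pyIdx?]

theorem pyGet?_neg_one_getLast {l : List Int} (h : l ≠ []) : PySem.List.pyGet? l (-1) = l.getLast? := by
  simp [PySem.List.pyGet?, PySem.List.pyIdx?]
  rw [List.getLast?_eq_getElem?]
  cases l with
  | nil => simp at h
  | cons a t => simp

theorem map_filter_snd (l : List (Int × Int)) (p : Int → Bool) :
    (l.filter (fun i => p i.2)).map (fun i => i.2) = (l.map (fun i => i.2)).filter p := by
  induction l with
  | nil => rfl
  | cons a t ih => by_cases h : p a.2 <;> simp [h, ih]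

theorem getLast?_eq_max {s : List Int} {l : List (Int × Int)} {m : Int}
    (hmem : ∀ v, v ∈ s ↔ v ∈ l.map (fun i => i.2)) (hslt : s.Pairwise (· < ·))
    (h : PySem.List.max? (l.map (fun i => i.2)) (fun x => x) = some m) : s.getLast? = some m := by
  have hm : m ∈ s := (hmem m).mpr (PySem.List.max?_mem h)
  cases hl : s.getLast? with
  | none => rw [List.getLast?_eq_none_iff] at hl; simp [hl] at hm
  | some m' =>
    rcases getLast?_isMax hslt hl with ⟨h1, h2⟩
    have hle1 : m' ≤ m := PySem.List.max?_isMax h m' ((hmem m').mp h1)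
    have hle2 : m ≤ m' := h2 m hm
    rw [le_antisymm hle1 hle2]

theorem head?_eq_min {s : List Int} {l : List (Int × Int)} {m : Int}
    (hmem : ∀ v, v ∈ s ↔ v ∈ l.map (fun i => i.2)) (hslt : s.Pairwise (· < ·))
    (h : PySem.List.min? (l.map (fun i => i.2)) (fun x => x) = some m) : s.head? = some m := by
  have hm : m ∈ s := (hmem m).mpr (PySem.List.min?_mem h)
  cases hl : s.head? with
  | none => rw [List.head?_eq_none_iff] at hl; simp [hl] at hm
  | some m' =>
    rcases head?_isMin hslt hl with ⟨h1, h2⟩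
    have hle1 : m ≤ m' := PySem.List.min?_isMin h m' ((hmem m').mp h1)
    have hle2 : m' ≤ m := h2 m hm
    rw [le_antisymm hle1 hle2]

theorem above_none_iff {s : List Int} {l : List (Int × Int)} (x : Int)
    (hmem : ∀ v, v ∈ s ↔ v ∈ l.map (fun i => i.2)) :
    pvAbove x s = none ↔ (l.filter (fun i => decide (x < i.2))).map (fun i => i.2) = [] := by
  rw [pvAbove_eq_head_filter, map_filter_snd l (fun v => decide (x < v)), List.head?_eq_none_iff,
    List.filter_eq_nil_iff, List.filter_eq_nil_iff]
  constructor
  · intro h v hv; exact h v ((hmem v).mpr hv)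
  · intro h v hv; exact h v ((hmem v).mp hv)

theorem below_none_iff {s : List Int} {l : List (Int × Int)} (x : Int)
    (hmem : ∀ v, v ∈ s ↔ v ∈ l.map (fun i => i.2)) (hslt : s.Pairwise (· < ·)) :
    pvBelow x s none = none ↔ (l.filter (fun i => decide (i.2 < x))).map (fun i => i.2) = [] := by
  rw [pvBelow_eq_filter x hslt, map_filter_snd l (fun v => decide (v < x)), Option.or_none, List.getLast?_eq_none_iff,
    List.filter_eq_nil_iff, List.filter_eq_nil_iff]
  constructor
  · intro h v hv; exact h v ((hmem v).mpr hv)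
  · intro h v hv; exact h v ((hmem v).mp hv)

theorem above_some_min {s : List Int} {l : List (Int × Int)} {x m : Int}
    (hmem : ∀ v, v ∈ s ↔ v ∈ l.map (fun i => i.2)) (hslt : s.Pairwise (· < ·))
    (h : pvAbove x s = some m) :
    PySem.List.min? ((l.filter (fun i => decide (x < i.2))).map (fun i => i.2)) (fun y => y) = some m := by
  rw [map_filter_snd l (fun v => decide (x < v))]
  rw [pvAbove_eq_head_filter] at h
  rcases head?_isMin (hslt.filter _) h with ⟨h1, h2⟩
  have hmL : m ∈ (l.map (fun i => i.2)).filter (fun v => decide (x < v)) := by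
    rcases List.mem_filter.mp h1 with ⟨hm1, hm2⟩
    exact List.mem_filter.mpr ⟨(hmem m).mp hm1, hm2⟩
  cases hm' : PySem.List.min? ((l.map (fun i => i.2)).filter (fun v => decide (x < v))) (fun y => y) with
  | none => rw [PySem.List.min?_eq_none_iff] at hm'; simp [hm'] at hmL
  | some m' =>
    have h1' : m' ∈ s.filter (fun v => decide (x < v)) := by
      rcases List.mem_filter.mp (PySem.List.min?_mem hm') with ⟨hm1, hm2⟩
      exact List.mem_filter.mpr ⟨(hmem m').mpr hm1, hm2⟩
    have hle1 : m' ≤ m := PySem.List.min?_isMin hm' m hmL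
    have hle2 : m ≤ m' := h2 m' h1'
    rw [le_antisymm hle1 hle2]

theorem below_some_max {s : List Int} {l : List (Int × Int)} {x m : Int}
    (hmem : ∀ v, v ∈ s ↔ v ∈ l.map (fun i => i.2)) (hslt : s.Pairwise (· < ·))
    (h : pvBelow x s none = some m) :
    PySem.List.max? ((l.filter (fun i => decide (i.2 < x))).map (fun i => i.2)) (fun y => y) = some m := by
  rw [map_filter_snd l (fun v => decide (v < x))]
  rw [pvBelow_eq_filter x hslt, Option.or_none] at h
  rcases getLast?_isMax (hslt.filter _) h with ⟨h1, h2⟩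
  have hmL : m ∈ (l.map (fun i => i.2)).filter (fun v => decide (v < x)) := by
    rcases List.mem_filter.mp h1 with ⟨hm1, hm2⟩
    exact List.mem_filter.mpr ⟨(hmem m).mp hm1, hm2⟩
  cases hm' : PySem.List.max? ((l.map (fun i => i.2)).filter (fun v => decide (v < x))) (fun y => y) with
  | none => rw [PySem.List.max?_eq_none_iff] at hm'; simp [hm'] at hmL
  | some m' =>
    have h1' : m' ∈ s.filter (fun v => decide (v < x)) := by
      rcases List.mem_filter.mp (PySem.List.max?_mem hm') with ⟨hm1, hm2⟩
      exact List.mem_filter.mpr ⟨(hmem m').mpr hm1, hm2⟩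
    have hle1 : m ≤ m' := PySem.List.max?_isMax hm' m hmL
    have hle2 : m' ≤ m := h2 m' h1'
    rw [le_antisymm hle2 hle1]

-- the two if-chains agree once prev / R_max / R_min are fixed
theorem pvTail (buf_now : List (String × Int)) (r cu : Int) (R_i : List (Int × Int))
    (prev : Int × Int) (Rmax0 Rmin0 : Int) (s : List Int)
    (hmem : ∀ v, v ∈ s ↔ v ∈ R_i.map (fun i => i.2)) (hslt : s.Pairwise (· < ·))
    (hmax : PySem.List.max? (R_i.map (fun i => i.2)) (fun x => x) = some Rmax0)
    (hmin : PySem.List.min? (R_i.map (fun i => i.2)) (fun x => x) = some Rmin0)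
    (hprevmem : prev ∈ R_i) :
    (if (PySem.Dict.mk buf_now).getD "time" 0 ≤ r then ((pyMatch? Rmin0 R_i).getD (0, 0)).1
     else if r + cu ≤ (PySem.Dict.mk buf_now).getD "time" 0 then ((pyMatch? Rmax0 R_i).getD (0, 0)).1
     else if (if prev.2 == Rmax0 then Rmax0
              else if (R_i.filter (fun i => decide (prev.2 < i.2))).map (fun i => i.2) = [] then prev.2
              else (PySem.List.min? ((R_i.filter (fun i => decide (prev.2 < i.2))).map (fun i => i.2)) (fun x => x)).getD 0)
             ≤ (PySem.Dict.mk buf_now).getD "current" 0 then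
       if (R_i.filter (fun i => decide (i.2 < (PySem.Dict.mk buf_now).getD "current" 0))).map (fun i => i.2) = [] then prev.1
       else ((pyMatch? ((PySem.List.max? ((R_i.filter (fun i => decide (i.2 < (PySem.Dict.mk buf_now).getD "current" 0))).map (fun i => i.2)) (fun x => x)).getD 0) R_i).getD (0, 0)).1
     else if (PySem.Dict.mk buf_now).getD "current" 0 ≤
             (if prev.2 == Rmin0 then Rmin0
              else if (R_i.filter (fun i => decide (i.2 < prev.2))).map (fun i => i.2) = [] then prev.2
              else (PySem.List.max? ((R_i.filter (fun i => decide (i.2 < prev.2))).map (fun i => i.2)) (fun x => x)).getD 0) then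
       if (R_i.filter (fun i => decide ((PySem.Dict.mk buf_now).getD "current" 0 < i.2))).map (fun i => i.2) = [] then prev.1
       else ((pyMatch? ((PySem.List.min? ((R_i.filter (fun i => decide ((PySem.Dict.mk buf_now).getD "current" 0 < i.2))).map (fun i => i.2)) (fun x => x)).getD 0) R_i).getD (0, 0)).1
     else prev.1) =
    (if (PySem.Dict.mk buf_now).getD "time" 0 ≤ r then ((pyMatch? Rmin0 R_i).getD (0, 0)).1
     else if r + cu ≤ (PySem.Dict.mk buf_now).getD "time" 0 then ((pyMatch? Rmax0 R_i).getD (0, 0)).1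
     else if (pvAbove prev.2 s).getD prev.2 ≤ (PySem.Dict.mk buf_now).getD "current" 0 then
       pvLookup (pvFirstIdx R_i) prev.1 (pvBelow ((PySem.Dict.mk buf_now).getD "current" 0) s none)
     else if (PySem.Dict.mk buf_now).getD "current" 0 ≤ (pvBelow prev.2 s none).getD prev.2 then
       pvLookup (pvFirstIdx R_i) prev.1 (pvAbove ((PySem.Dict.mk buf_now).getD "current" 0) s)
     else prev.1) := by
  have hp2 : prev.2 ∈ R_i.map (fun i => i.2) := List.mem_map_of_mem hprevmem
  have hplus : (if prev.2 == Rmax0 then Rmax0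
      else if (R_i.filter (fun i => decide (prev.2 < i.2))).map (fun i => i.2) = [] then prev.2
      else (PySem.List.min? ((R_i.filter (fun i => decide (prev.2 < i.2))).map (fun i => i.2)) (fun x => x)).getD 0)
      = (pvAbove prev.2 s).getD prev.2 := by
    by_cases hpm : prev.2 = Rmax0
    · have hab : pvAbove prev.2 s = none := by
        rw [pvAbove_eq_head_filter, List.head?_eq_none_iff, List.filter_eq_nil_iff]
        intro v hv
        have := PySem.List.max?_isMax hmax v ((hmem v).mp hv)
        simp only [decide_eq_true_eq, not_lt]
        omega
      simp only [hpm] at hab ⊢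
      simp [hab]
    · have hlt : prev.2 < Rmax0 := lt_of_le_of_ne (PySem.List.max?_isMax hmax _ hp2) hpm
      have hnemp : ¬ (R_i.filter (fun i => decide (prev.2 < i.2))).map (fun i => i.2) = [] := by
        rcases List.mem_map.mp (PySem.List.max?_mem hmax) with ⟨e, he, he2⟩
        intro hc
        rw [map_filter_snd R_i (fun v => decide (prev.2 < v)), List.filter_eq_nil_iff] at hc
        exact absurd hlt (by simpa using hc Rmax0 (he2 ▸ List.mem_map_of_mem he))
      cases hab : pvAbove prev.2 s with
      | none => exact absurd ((above_none_iff prev.2 hmem).mp hab) hnemp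
      | some m =>
        rw [above_some_min hmem hslt hab]
        simp [hpm, hnemp]
  have hmins : (if prev.2 == Rmin0 then Rmin0
      else if (R_i.filter (fun i => decide (i.2 < prev.2))).map (fun i => i.2) = [] then prev.2
      else (PySem.List.max? ((R_i.filter (fun i => decide (i.2 < prev.2))).map (fun i => i.2)) (fun x => x)).getD 0)
      = (pvBelow prev.2 s none).getD prev.2 := by
    by_cases hpm : prev.2 = Rmin0
    · have hab : pvBelow prev.2 s none = none := by
        rw [pvBelow_eq_filter prev.2 hslt, Option.or_none, List.getLast?_eq_none_iff, List.filter_eq_nil_iff]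
        intro v hv
        have := PySem.List.min?_isMin hmin v ((hmem v).mp hv)
        simp only [decide_eq_true_eq, not_lt]
        omega
      simp only [hpm] at hab ⊢
      simp [hab]
    · have hlt : Rmin0 < prev.2 := lt_of_le_of_ne (PySem.List.min?_isMin hmin _ hp2) (fun h => hpm h.symm)
      have hnemp : ¬ (R_i.filter (fun i => decide (i.2 < prev.2))).map (fun i => i.2) = [] := by
        rcases List.mem_map.mp (PySem.List.min?_mem hmin) with ⟨e, he, he2⟩
        intro hc
        rw [map_filter_snd R_i (fun v => decide (v < prev.2)), List.filter_eq_nil_iff] at hc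
        exact absurd hlt (by simpa using hc Rmin0 (he2 ▸ List.mem_map_of_mem he))
      cases hab : pvBelow prev.2 s none with
      | none => exact absurd ((below_none_iff prev.2 hmem hslt).mp hab) hnemp
      | some m =>
        rw [below_some_max hmem hslt hab]
        simp [hpm, hnemp]
  have h3body : (if (R_i.filter (fun i => decide (i.2 < (PySem.Dict.mk buf_now).getD "current" 0))).map (fun i => i.2) = [] then prev.1
       else ((pyMatch? ((PySem.List.max? ((R_i.filter (fun i => decide (i.2 < (PySem.Dict.mk buf_now).getD "current" 0))).map (fun i => i.2)) (fun x => x)).getD 0) R_i).getD (0, 0)).1)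
      = pvLookup (pvFirstIdx R_i) prev.1 (pvBelow ((PySem.Dict.mk buf_now).getD "current" 0) s none) := by
    cases hb : pvBelow ((PySem.Dict.mk buf_now).getD "current" 0) s none with
    | none => rw [if_pos ((below_none_iff _ hmem hslt).mp hb)]; rfl
    | some m =>
      have hnee : ¬ (R_i.filter (fun i => decide (i.2 < (PySem.Dict.mk buf_now).getD "current" 0))).map (fun i => i.2) = [] := by
        intro hc
        rw [← below_none_iff _ hmem hslt] at hc
        rw [hc] at hb; cases hb
      rw [if_neg hnee, below_some_max hmem hslt hb]
      simp [pvLookup, get?_pvFirstIdx]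
  have h4body : (if (R_i.filter (fun i => decide ((PySem.Dict.mk buf_now).getD "current" 0 < i.2))).map (fun i => i.2) = [] then prev.1
       else ((pyMatch? ((PySem.List.min? ((R_i.filter (fun i => decide ((PySem.Dict.mk buf_now).getD "current" 0 < i.2))).map (fun i => i.2)) (fun x => x)).getD 0) R_i).getD (0, 0)).1)
      = pvLookup (pvFirstIdx R_i) prev.1 (pvAbove ((PySem.Dict.mk buf_now).getD "current" 0) s) := by
    cases ha : pvAbove ((PySem.Dict.mk buf_now).getD "current" 0) s with
    | none => rw [if_pos ((above_none_iff _ hmem).mp ha)]; rfl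
    | some m =>
      have hnee : ¬ (R_i.filter (fun i => decide ((PySem.Dict.mk buf_now).getD "current" 0 < i.2))).map (fun i => i.2) = [] := by
        intro hc
        rw [← above_none_iff _ hmem] at hc
        rw [hc] at ha; cases ha
      rw [if_neg hnee, above_some_min hmem hslt ha]
      simp [pvLookup, get?_pvFirstIdx]
  rw [hplus, hmins, h3body, h4body]

-- ===== VERDICT (by name: the statement is the Claim_ definition above) =====
theorem bufferbased_spec : Claim_equal_bufferbased := by
  intro rate_prev buf_now r R_i cu hdom hpre
  obtain ⟨hne, htime, hcur⟩ := hpre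
  unfold Spec_bufferbased
  have hvne : R_i.map (fun i => i.2) ≠ [] := by
    intro h; exact hne (List.map_eq_nil_iff.mp h)
  obtain ⟨Rmax0, hmax⟩ : ∃ m, PySem.List.max? (R_i.map (fun i => i.2)) (fun x => x) = some m := by
    cases h : PySem.List.max? (R_i.map (fun i => i.2)) (fun x => x) with
    | none => exact absurd ((PySem.List.max?_eq_none_iff _ _).mp h) hvne
    | some m => exact ⟨m, rfl⟩
  obtain ⟨Rmin0, hmin⟩ : ∃ m, PySem.List.min? (R_i.map (fun i => i.2)) (fun x => x) = some m := by
    cases h : PySem.List.min? (R_i.map (fun i => i.2)) (fun x => x) with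
    | none => exact absurd ((PySem.List.min?_eq_none_iff _ _).mp h) hvne
    | some m => exact ⟨m, rfl⟩
  have hmem : ∀ v, v ∈ PySem.List.sorted (pvFirstIdx R_i).keys (fun x => x) ↔ v ∈ R_i.map (fun i => i.2) := by
    intro v; rw [PySem.List.mem_sorted, mem_keys_pvFirstIdx]
  have hslt := sorted_keys_lt R_i
  have hsne : PySem.List.sorted (pvFirstIdx R_i).keys (fun x => x) ≠ [] := by
    intro h
    have := (hmem Rmax0).mpr (PySem.List.max?_mem hmax)
    simp [h] at this
  have hlast : PySem.List.pyGet? (PySem.List.sorted (pvFirstIdx R_i).keys (fun x => x)) (-1) = some Rmax0 := by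
    rw [pyGet?_neg_one_getLast hsne]; exact getLast?_eq_max hmem hslt hmax
  have hhead : PySem.List.pyGet? (PySem.List.sorted (pvFirstIdx R_i).keys (fun x => x)) 0 = some Rmin0 := by
    rw [pyGet?_zero_head hsne]; exact head?_eq_min hmem hslt hmin
  cases hm : pyMatch? rate_prev R_i with
  | some e =>
    have hprevA : pyPrevmatch? rate_prev R_i = some e := by rw [pyPrevmatch?, hm]
    simp only [bufferbased, bufferbased_alt, hmax, hmin, hprevA, hhead, hlast,
      get?_pvFirstIdx, hm, Option.getD_some, Option.elim_some]
    exact pvTail buf_now r cu R_i e Rmax0 Rmin0 _ hmem hslt hmax hmin (pyMatch?_mem hm).1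
  | none =>
    obtain ⟨e, hm2⟩ : ∃ e, pyMatch? Rmax0 R_i = some e := by
      cases h : pyMatch? Rmax0 R_i with
      | none => exact absurd (PySem.List.max?_mem hmax) (pyMatch?_eq_none_iff.mp h)
      | some e => exact ⟨e, rfl⟩
    have hprevA : pyPrevmatch? rate_prev R_i = some e := by simp [pyPrevmatch?, hm, hmax, hm2]
    simp only [bufferbased, bufferbased_alt, hmax, hmin, hprevA, hhead, hlast,
      get?_pvFirstIdx, hm, hm2, Option.getD_some, Option.elim_some]
    have h := pvTail buf_now r cu R_i e Rmax0 Rmin0 _ hmem hslt hmax hmin (pyMatch?_mem hm2).1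
    simp only [hm2, Option.getD_some] at h
    exact h
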